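-- pv_equiv track=rewrite | github.com/BiancaBya/University-Projects | First-Semester/Fundamentele Programarii/Examen/Divide_et_Impera/probleme.py | produs_nr_poz_pare
-- ===== SOURCE A (Python) =====
-- def produs_nr_poz_pare(lista):
--
--     if len(lista) == 0:
--         return
--     elif len(lista) == 1:
--         return lista[0]
--
--     mij = len(lista) // 2
--     stanga = produs_nr_poz_pare(lista[:mij:2])
--     dreapta = produs_nr_poz_pare(lista[mij::2])
--     return stanga * dreapta
-- ===== SOURCE B (Python) =====
-- def produs_nr_poz_pare(lista):
--     if not lista:
--         return None
--     stack = [lista]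
--     produs = 1
--     while stack:
--         seg = stack.pop()
--         if len(seg) == 1:
--             produs *= seg[0]
--         else:
--             mij = len(seg) // 2
--             stack.append(seg[:mij:2])
--             stack.append(seg[mij::2])
--     return produs
-- ===== Notes on version B (the rewrite author's own statement) =====
-- stated objective: alternative
-- what changed: Replaces the divide-and-conquer recursion by an explicit worklist (stack of segments) with a flat running product, exploiting commutativity/associativity of multiplication.
import Mathlib
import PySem

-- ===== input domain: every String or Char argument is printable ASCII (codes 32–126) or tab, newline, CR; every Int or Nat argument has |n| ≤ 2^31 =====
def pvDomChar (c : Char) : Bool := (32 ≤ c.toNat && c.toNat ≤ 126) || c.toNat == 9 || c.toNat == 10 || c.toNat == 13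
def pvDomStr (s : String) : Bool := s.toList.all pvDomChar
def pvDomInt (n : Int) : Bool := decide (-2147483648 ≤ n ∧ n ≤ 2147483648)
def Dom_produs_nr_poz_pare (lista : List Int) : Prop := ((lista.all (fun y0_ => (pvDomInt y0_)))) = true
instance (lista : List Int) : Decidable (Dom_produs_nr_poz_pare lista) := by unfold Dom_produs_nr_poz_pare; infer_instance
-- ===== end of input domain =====

-- B replaces A's divide-and-conquer recursion by an explicit stack of segments and one
-- flat running product (objective: alternative decomposition, same cost).

-- Hand port of the extended slice with step 2 and nonnegative bounds (the stop/start
-- having been folded into take/drop by the caller): exact for Python's xs[:m:2] /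
-- xs[m::2] with 0 ≤ m ≤ len(xs), which is the only way both ports use it (m = len//2).
def everyOther : List Int → List Int
  | [] => []
  | [x] => [x]
  | x :: _ :: rest => x :: everyOther rest

-- ===== PORT A =====
-- literal transliteration of A: len checks, mij = len//2 (len nonneg, so Nat division
-- is exact for Python's //), the two strided slices, and stanga * dreapta (the
-- None * None path is unreachable in Python; ported as the corresponding Option match).
-- The Nat argument is structural fuel only (each recursive call strictly shrinks the
-- list, so fuel = initial length is always enough); the fuel-exhausted branch is
-- unreachable in the wrapper.
def produsGo : Nat → List Int → Option Int
  | 0, _ => none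
  | fuel + 1, lista =>
    if lista.length = 0 then none
    else if lista.length = 1 then PySem.List.pyGet? lista 0
    else
      let mij := lista.length / 2
      match produsGo fuel (everyOther (lista.take mij)),
            produsGo fuel (everyOther (lista.drop mij)) with
      | some stanga, some dreapta => some (stanga * dreapta)
      | _, _ => none

def produs_nr_poz_pare (lista : List Int) : Option Int :=
  produsGo lista.length lista

-- ===== PORT B =====
-- the while-loop of Source B: stack of segments (head = top), running product.  The Nat
-- argument is structural fuel only (each iteration strictly decreases the total
-- segment weight, which starts below 2·len; the fuel-exhausted branch is unreachable
-- from the wrapper), and popping an empty segment never happens (Source B never pushes one).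
def altLoopGo : Nat → List (List Int) → Int → Int
  | 0, _, produs => produs
  | _ + 1, [], produs => produs
  | fuel + 1, seg :: rest, produs =>
    if seg.length = 1 then altLoopGo fuel rest (produs * seg.headI)
    else if seg.length = 0 then altLoopGo fuel rest produs
    else
      let mij := seg.length / 2
      altLoopGo fuel (everyOther (seg.drop mij) :: everyOther (seg.take mij) :: rest) produs

def produs_nr_poz_pare_alt (lista : List Int) : Option Int :=
  if lista.isEmpty then none
  else some (altLoopGo (2 * lista.length) [lista] 1)

-- ===== PRECONDITION & SPEC =====
def Spec_produs_nr_poz_pare (lista : List Int) (out : Option Int) : Prop := out = produs_nr_poz_pare_alt lista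
instance (lista : List Int) (out : Option Int) : Decidable (Spec_produs_nr_poz_pare lista out) := by unfold Spec_produs_nr_poz_pare; infer_instance

-- ===== CLAIM (what is proved, stated in full; the proofs are below) =====
def Claim_equal_produs_nr_poz_pare : Prop := ∀ (lista : List Int), Dom_produs_nr_poz_pare lista → Spec_produs_nr_poz_pare lista (produs_nr_poz_pare lista)

-- ===== LEMMAS AND PROOFS =====

theorem everyOther_length (l : List Int) : (everyOther l).length = (l.length + 1) / 2 := by
  induction l using everyOther.induct with
  | case1 => simp [everyOther]
  | case2 x => simp [everyOther]
  | case3 x y rest ih => simp [everyOther, ih]; omega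

theorem altLoopGo_nil (f : Nat) (p : Int) : altLoopGo f [] p = p := by
  cases f <;> rfl

-- Core invariant: a nonempty segment seg has a definite value v under A (for any
-- sufficient fuel), and popping it from the stack multiplies exactly v into the
-- accumulator in some number `used ≤ 2·len(seg) - 1` of loop iterations, whatever
-- lies below it on the stack.
theorem main_invariant : ∀ (n : Nat) (seg : List Int), seg.length ≤ n → seg ≠ [] →
    ∃ v used,
      (∀ f, seg.length ≤ f → produsGo f seg = some v) ∧
      used + 1 ≤ 2 * seg.length ∧
      ∀ (f : Nat) (rest : List (List Int)) (p : Int),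
        altLoopGo (used + f) (seg :: rest) p = altLoopGo f rest (p * v) := by
  intro n
  induction n with
  | zero => intro seg hlen hne; cases seg <;> simp_all
  | succ n ih =>
    intro seg hlen hne
    by_cases h1 : seg.length = 1
    · obtain ⟨x, hx⟩ : ∃ x, seg = [x] := by
        cases seg with
        | nil => simp at h1
        | cons a t => cases t <;> simp_all
      subst hx
      refine ⟨x, 1, ?_, by simp, ?_⟩
      · intro f hf
        match f, hf with
        | f + 1, _ =>
          rw [produsGo]; simp [PySem.List.pyGet?, PySem.List.pyIdx?]
      · intro f rest p
        rw [Nat.add_comm 1 f]  -- used + f = f + 1, exposing the successor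
        rw [altLoopGo]; simp [List.headI]
    · have h2 : 2 ≤ seg.length := by
        cases seg with
        | nil => simp_all
        | cons a t => cases t <;> simp_all <;> omega
      set mij := seg.length / 2 with hmij
      have htlen : (seg.take mij).length = mij := by simp; omega
      have hdlen : (seg.drop mij).length = seg.length - mij := by simp
      have hsl : (everyOther (seg.take mij)).length = (mij + 1) / 2 := by
        rw [everyOther_length, htlen]
      have hdl : (everyOther (seg.drop mij)).length = (seg.length - mij + 1) / 2 := by
        rw [everyOther_length, hdlen]
      have hsne : everyOther (seg.take mij) ≠ [] := by
        intro h; rw [← List.length_eq_zero_iff] at h; omega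
      have hdne : everyOther (seg.drop mij) ≠ [] := by
        intro h; rw [← List.length_eq_zero_iff] at h; omega
      obtain ⟨vs, us, hAs, hus, hLs⟩ := ih (everyOther (seg.take mij)) (by omega) hsne
      obtain ⟨vd, ud, hAd, hud, hLd⟩ := ih (everyOther (seg.drop mij)) (by omega) hdne
      refine ⟨vs * vd, 1 + ud + us, ?_, by omega, ?_⟩
      · intro f hf
        obtain ⟨f, rfl⟩ : ∃ f', f = f' + 1 := ⟨f - 1, by omega⟩
        rw [produsGo]
        have hf : seg.length ≤ f + 1 := hf
        have hfs : (everyOther (seg.take mij)).length ≤ f := by omega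
        have hfd : (everyOther (seg.drop mij)).length ≤ f := by omega
        simp only [if_neg (by omega : ¬ seg.length = 0), if_neg h1, ← hmij,
          hAs f hfs, hAd f hfd]
      · intro f rest p
        have : 1 + ud + us + f = (ud + (us + f)) + 1 := by omega
        rw [this, altLoopGo]
        simp only [if_neg h1, if_neg (by omega : ¬ seg.length = 0), ← hmij]
        rw [hLd, hLs]
        ring_nf

-- ===== VERDICT (by name: the statement is the Claim_ definition above) =====
theorem produs_nr_poz_pare_spec : Claim_equal_produs_nr_poz_pare := by
  intro lista _
  unfold Spec_produs_nr_poz_pare produs_nr_poz_pare produs_nr_poz_pare_alt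
  by_cases h : lista = []
  · subst h; rfl
  · obtain ⟨v, used, hA, hused, hL⟩ := main_invariant lista.length lista le_rfl h
    rw [hA lista.length le_rfl]
    have hsplit : 2 * lista.length = used + (2 * lista.length - used) := by omega
    rw [hsplit, hL, altLoopGo_nil]
    simp [List.isEmpty_iff, h]
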